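-- pv_equiv track=rewrite | github.com/VP4304/CloSpan_Nhom10 | clospan_gui.py | run_clospan
-- ===== SOURCE A (Python) =====
-- from collections import defaultdict
-- from copy import deepcopy
--
-- def run_clospan(sequences, minsup):
--     def support(pattern, database):
--         count = 0
--         for seq in database:
--             if is_subsequence(pattern, seq):
--                 count += 1
--         return count
--
--     def is_subsequence(pattern, sequence):
--         i = 0
--         for itemset in sequence:
--             if i < len(pattern) and set(pattern[i]).issubset(set(itemset)):
--                 i += 1
--         return i == len(pattern)
--
--     def project_database(database, pattern):
--         projected = []
--         for seq in database:
--             proj = []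
--             matched = False
--             for idx, itemset in enumerate(seq):
--                 if not matched and set(pattern[-1]).issubset(set(itemset)):
--                     matched = True
--                     proj.extend(seq[idx + 1:])
--                 elif matched:
--                     proj.append(itemset)
--             if matched and proj:
--                 projected.append(proj)
--         return projected
--
--     def dfs(pattern, db, results):
--         sup = support(pattern, sequences)
--         if sup < minsup:
--             return
--         if pattern:
--             results.append((deepcopy(pattern), sup))
--
--         items = defaultdict(int)
--         for seq in db:
--             seen = set()
--             for itemset in seq:
--                 for item in itemset:
--                     if item not in seen:
--                         items[item] += 1
--                         seen.add(item)
--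
--         for item, item_sup in items.items():
--             if item_sup >= minsup:
--                 new_pattern = deepcopy(pattern)
--                 new_pattern.append([item])
--                 new_db = project_database(db, new_pattern)
--                 dfs(new_pattern, new_db, results)
--
--     results = []
--     dfs([], sequences, results)
--
--     # Lọc lại chỉ giữ các mẫu tuần tự đóng
--     closed_results = []
--     for i, (pattern_i, sup_i) in enumerate(results):
--         is_closed = True
--         for j, (pattern_j, sup_j) in enumerate(results):
--             if i != j and sup_i == sup_j and is_subsequence(pattern_i, pattern_j) and not is_subsequence(pattern_j, pattern_i):
--                 is_closed = False
--                 break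
--         if is_closed:
--             closed_results.append((pattern_i, sup_i))
--
--     return closed_results
-- ===== SOURCE B (Python) =====
-- def run_clospan(sequences, minsup):
--     # Iterative DFS with an explicit LIFO stack (same preorder as the recursive
--     # version), then a support-bucketed closed-pattern filter: patterns are only
--     # compared against patterns sharing their support value.
--     def support(pattern, database):
--         count = 0
--         for seq in database:
--             if is_subsequence(pattern, seq):
--                 count += 1
--         return count
--
--     def is_subsequence(pattern, sequence):
--         i = 0
--         for itemset in sequence:
--             if i < len(pattern) and set(pattern[i]).issubset(set(itemset)):
--                 i += 1
--         return i == len(pattern)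
--
--     def project_database(database, pattern):
--         projected = []
--         for seq in database:
--             proj = []
--             matched = False
--             for idx, itemset in enumerate(seq):
--                 if not matched and set(pattern[-1]).issubset(set(itemset)):
--                     matched = True
--                     proj.extend(seq[idx + 1:])
--                 elif matched:
--                     proj.append(itemset)
--             if matched and proj:
--                 projected.append(proj)
--         return projected
--
--     results = []
--     stack = [([], sequences)]
--     while stack:
--         pattern, db = stack.pop()
--         sup = support(pattern, sequences)
--         if sup < minsup:
--             continue
--         if pattern:
--             results.append((pattern, sup))
--         items = {}
--         for seq in db:
--             seen = set()
--             for itemset in seq: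
--                 for item in itemset:
--                     if item not in seen:
--                         items[item] = items.get(item, 0) + 1
--                         seen.add(item)
--         children = []
--         for item, item_sup in items.items():
--             if item_sup >= minsup:
--                 new_pattern = pattern + [[item]]
--                 children.append((new_pattern, project_database(db, new_pattern)))
--         stack.extend(reversed(children))
--
--     buckets = {}
--     for p, s in results:
--         buckets.setdefault(s, []).append(p)
--     return [(p, s) for p, s in results
--             if not any(is_subsequence(p, q) and not is_subsequence(q, p)
--                        for q in buckets[s])]
-- ===== Notes on version B (the rewrite author's own statement) =====
-- stated objective: alternative
-- what changed: The recursive dfs is replaced by an explicit LIFO stack of (pattern, projected-db) frames pushed in reverse so the same preorder of results is produced, and the all-pairs closed-pattern filter is replaced by one that buckets the mined patterns by support value and compares each pattern only against its own bucket.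
import Mathlib
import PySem

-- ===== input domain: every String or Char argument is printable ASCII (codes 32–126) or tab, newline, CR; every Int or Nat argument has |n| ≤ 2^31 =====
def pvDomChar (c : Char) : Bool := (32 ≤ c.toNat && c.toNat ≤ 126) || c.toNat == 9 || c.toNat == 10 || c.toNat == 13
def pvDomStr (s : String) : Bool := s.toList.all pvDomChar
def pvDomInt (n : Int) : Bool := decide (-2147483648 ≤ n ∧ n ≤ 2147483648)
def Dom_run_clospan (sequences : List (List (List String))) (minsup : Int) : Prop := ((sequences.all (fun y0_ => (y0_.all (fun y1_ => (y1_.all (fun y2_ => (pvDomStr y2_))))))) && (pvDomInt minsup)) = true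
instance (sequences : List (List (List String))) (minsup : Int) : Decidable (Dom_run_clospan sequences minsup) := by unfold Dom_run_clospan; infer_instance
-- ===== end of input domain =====

-- B replaces A's recursive dfs by an explicit LIFO stack producing the same preorder, and
-- replaces the all-pairs closed-pattern filter by a support-bucketed one (alternative shape,
-- no speed claim). Equivalence is about the return value; neither program mutates its input.

-- ===== PORT A =====
-- shared helpers: the helper functions support / is_subsequence / project_database and the
-- item-counting loop are textually identical in A and in B (Source B), so they are defined once.

-- set(a).issubset(set(b))
def pvSubset (a b : List String) : Bool := a.all (fun x => b.contains x)

-- is_subsequence(pattern, seq): greedy counter over the itemsets of seq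
def pvIsSub (pattern seq : List (List String)) : Bool :=
  (seq.foldl (fun (i : Nat) itemset =>
      if i < pattern.length && pvSubset (pattern.getD i []) itemset then i + 1 else i) 0)
    == pattern.length

-- support(pattern, database)
def pvSupport (pattern : List (List String)) (database : List (List (List String))) : Int :=
  database.foldl (fun c seq => if pvIsSub pattern seq then c + 1 else c) 0

-- the inner per-sequence loop of project_database: returns (matched, proj)
def pvProjSeq (lastIs : List String) (seq : List (List String)) : Bool × List (List String) :=
  (PySem.List.enumerate seq 0).foldl (fun st p =>
    if !st.1 && pvSubset lastIs p.2 then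
      (true, st.2 ++ PySem.List.slice seq (some (p.1 + 1)) none)
    else if st.1 then (st.1, st.2 ++ [p.2])
    else st) (false, [])

-- project_database(database, pattern); pattern[-1] — every call site passes a nonempty
-- pattern, so the .getD [] default for the empty pattern is never exercised
def pvProject (database : List (List (List String))) (pattern : List (List String)) :
    List (List (List String)) :=
  let lastIs := pattern.getLast?.getD []
  database.foldl (fun acc seq =>
    let mp := pvProjSeq lastIs seq
    if mp.1 && !mp.2.isEmpty then acc ++ [mp.2] else acc) []

-- the item-counting loop (defaultdict insertion order, per-sequence `seen` set)
def pvCollectItems (db : List (List (List String))) : PySem.Dict String Int :=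
  db.foldl (fun d seq =>
    (seq.foldl (fun (st : PySem.Dict String Int × PySem.Set String) itemset =>
        itemset.foldl (fun st item =>
          if st.2.contains item then st
          else (st.1.modify item 0 (· + 1), PySem.Set.add st.2 item)) st)
      (d, PySem.Set.empty)).1) PySem.Dict.empty

-- max sequence length + 2: a depth-fuel bound; recursion depth never exceeds it on any
-- input A terminates on (with minsup ≥ 1 a pattern longer than every sequence has
-- support 0 < minsup; in the minsup ≤ 0 cases where A terminates the depth is ≤ 2)
def pvMaxLen (sequences : List (List (List String))) : Nat :=
  sequences.foldl (fun m s => max m s.length) 0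

-- A's recursive dfs (results threaded as an accumulator; fuel = depth guard only)
mutual
def pvDfs (sequences : List (List (List String))) (minsup : Int) :
    Nat → List (List String) → List (List (List String)) →
    List (List (List String) × Int) → List (List (List String) × Int)
  | 0, _, _, res => res
  | d + 1, pattern, db, res =>
    let sup := pvSupport pattern sequences
    if sup < minsup then res
    else
      let res' := if pattern.isEmpty then res else res ++ [(pattern, sup)]
      pvDfsLoop sequences minsup d pattern db (pvCollectItems db).items res'
  termination_by d _ _ _ => (d, 0, 0)
def pvDfsLoop (sequences : List (List (List String))) (minsup : Int) :
    Nat → List (List String) → List (List (List String)) → List (String × Int) →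
    List (List (List String) × Int) → List (List (List String) × Int)
  | _, _, _, [], res => res
  | d, pattern, db, (item, isup) :: rest, res =>
    let res' :=
      if minsup ≤ isup then
        pvDfs sequences minsup d (pattern ++ [[item]])
          (pvProject db (pattern ++ [[item]])) res
      else res
    pvDfsLoop sequences minsup d pattern db rest res'
  termination_by d _ _ its _ => (d, 1, its.length)
end

-- the closed-pattern filter of A: all-pairs scan with indices (inner break = List.any)
def pvClosedA (results : List (List (List String) × Int)) : List (List (List String) × Int) :=
  (PySem.List.enumerate results 0).foldl (fun acc x =>
    let bad := (PySem.List.enumerate results 0).any (fun y =>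
      !(x.1 == y.1) && ((x.2.2 == y.2.2) && (pvIsSub x.2.1 y.2.1 && !pvIsSub y.2.1 x.2.1)))
    if bad then acc else acc ++ [x.2]) []

def run_clospan (sequences : List (List (List String))) (minsup : Int) :
    List (List (List String) × Int) :=
  pvClosedA (pvDfs sequences minsup (pvMaxLen sequences + 2) [] sequences [])

-- ===== PORT B =====

-- pop-count of B's stack loop (the exact number of frames the loop pops); used only as
-- the loop's totality fuel — Source B's `while stack` needs none
mutual
def pvCC (sequences : List (List (List String))) (minsup : Int) :
    Nat → List (List String) → List (List (List String)) → Nat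
  | 0, _, _ => 1
  | d + 1, pattern, db =>
    if pvSupport pattern sequences < minsup then 1
    else 1 + pvCCL sequences minsup d pattern db (pvCollectItems db).items
  termination_by d _ _ => (d, 0, 0)
def pvCCL (sequences : List (List (List String))) (minsup : Int) :
    Nat → List (List String) → List (List (List String)) → List (String × Int) → Nat
  | _, _, _, [] => 0
  | d, pattern, db, (item, isup) :: rest =>
    (if minsup ≤ isup then
      pvCC sequences minsup d (pattern ++ [[item]]) (pvProject db (pattern ++ [[item]]))
     else 0) + pvCCL sequences minsup d pattern db rest
  termination_by d _ _ its => (d, 1, its.length)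
end

-- the child frames a popped frame pushes (Source B's comprehension over items.items();
-- frames carry a depth counter as part of the fuel guard)
def pvChildren (minsup : Int) (d : Nat) (pattern : List (List String))
    (db : List (List (List String))) (its : List (String × Int)) :
    List (Nat × List (List String) × List (List (List String))) :=
  its.filterMap (fun x =>
    if minsup ≤ x.2 then
      some (d, pattern ++ [[x.1]], pvProject db (pattern ++ [[x.1]]))
    else none)

-- Source B's `while stack:` loop; the list head is the top of the stack, so Source B's
-- stack.extend(reversed(children)) + pop() is `children ++ st`; first argument is the
-- pop-count fuel, a frame whose depth guard is exhausted is dropped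
def pvRunStack (sequences : List (List (List String))) (minsup : Int) :
    Nat → List (Nat × List (List String) × List (List (List String))) →
    List (List (List String) × Int) → List (List (List String) × Int)
  | 0, _, res => res
  | _ + 1, [], res => res
  | n + 1, (0, _, _) :: st, res => pvRunStack sequences minsup n st res
  | n + 1, (d + 1, pattern, db) :: st, res =>
    let sup := pvSupport pattern sequences
    if sup < minsup then pvRunStack sequences minsup n st res
    else
      let res' := if pattern.isEmpty then res else res ++ [(pattern, sup)]
      pvRunStack sequences minsup n
        (pvChildren minsup d pattern db (pvCollectItems db).items ++ st) res'

-- buckets: support value ↦ patterns with that support, in results order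
def pvBuckets (results : List (List (List String) × Int)) :
    PySem.Dict Int (List (List (List String))) :=
  results.foldl (fun d ps => d.modify ps.2 [] (· ++ [ps.1])) PySem.Dict.empty

-- B's closed-pattern filter: each pattern is compared only against its support bucket
def pvClosedB (results : List (List (List String) × Int)) : List (List (List String) × Int) :=
  let buckets := pvBuckets results
  results.filter (fun ps =>
    !((buckets.getD ps.2 []).any (fun q => pvIsSub ps.1 q && !pvIsSub q ps.1)))

def run_clospan_alt (sequences : List (List (List String))) (minsup : Int) :
    List (List (List String) × Int) :=
  pvClosedB (pvRunStack sequences minsup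
    (pvCC sequences minsup (pvMaxLen sequences + 2) [] sequences)
    [(pvMaxLen sequences + 2, [], sequences)] [])

-- ===== PRECONDITION & SPEC =====
def Spec_run_clospan (sequences : List (List (List String))) (minsup : Int) (out : List (List (List String) × Int)) : Prop := out = run_clospan_alt sequences minsup
instance (sequences : List (List (List String))) (minsup : Int) (out : List (List (List String) × Int)) : Decidable (Spec_run_clospan sequences minsup out) := by unfold Spec_run_clospan; infer_instance

-- ===== CLAIM (what is proved, stated in full; the proofs are below) =====
def Claim_equal_run_clospan : Prop := ∀ (sequences : List (List (List String))) (minsup : Int), Dom_run_clospan sequences minsup → Spec_run_clospan sequences minsup (run_clospan sequences minsup)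

-- ===== LEMMAS AND PROOFS =====

-- the stack loop, fed the pop-count of a frame as fuel, computes exactly A's dfs
theorem pvStack_eq_dfs (sequences : List (List (List String))) (minsup : Int) :
    ∀ (d : Nat) (p : List (List String)) (db : List (List (List String)))
      (st : List (Nat × List (List String) × List (List (List String))))
      (res : List (List (List String) × Int)) (n : Nat),
    pvRunStack sequences minsup (pvCC sequences minsup d p db + n) ((d, p, db) :: st) res
      = pvRunStack sequences minsup n st (pvDfs sequences minsup d p db res) := by
  intro d
  induction d with
  | zero =>
    intro p db st res n
    rw [show pvCC sequences minsup 0 p db + n = n + 1 by simp [pvCC]; omega]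
    simp [pvRunStack, pvDfs]
  | succ d ih =>
    intro p db st res n
    by_cases h : pvSupport p sequences < minsup
    · rw [show pvCC sequences minsup (d + 1) p db + n = n + 1 by simp [pvCC, h]; omega]
      simp [pvRunStack, pvDfs, h]
    · have L2 : ∀ (its : List (String × Int)) st res n,
          pvRunStack sequences minsup (pvCCL sequences minsup d p db its + n)
            (pvChildren minsup d p db its ++ st) res
          = pvRunStack sequences minsup n st (pvDfsLoop sequences minsup d p db its res) := by
        intro its
        induction its with
        | nil => intro st res n; simp [pvCCL, pvChildren, pvDfsLoop]
        | cons x rest ihr =>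
          intro st res n
          obtain ⟨item, isup⟩ := x
          by_cases hs : minsup ≤ isup
          · simp only [pvCCL, pvChildren, pvDfsLoop, if_pos hs, List.filterMap_cons]
            rw [Nat.add_assoc, List.cons_append, ih, ← pvChildren]
            exact ihr _ _ _
          · simp only [pvCCL, pvChildren, pvDfsLoop, if_neg hs, List.filterMap_cons]
            rw [Nat.zero_add, ← pvChildren]
            exact ihr _ _ _
      rw [show pvCC sequences minsup (d + 1) p db + n
            = (pvCCL sequences minsup d p db (pvCollectItems db).items + n) + 1 by
          simp [pvCC, h]; omega]
      simp only [pvRunStack, pvDfs, if_neg h]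
      exact L2 _ st _ n

-- the bucket-membership predicate both filters compute
def pvBad (rs : List (List (List String) × Int)) (ps : List (List String) × Int) : Bool :=
  rs.any (fun qt => (qt.2 == ps.2) && (pvIsSub ps.1 qt.1 && !pvIsSub qt.1 ps.1))

theorem pvSubset_self (a : List String) : pvSubset a a = true := by
  simp [pvSubset, List.all_eq_true]

theorem pvIsSub_aux (pat : List (List String)) : ∀ (suf pre : List (List String)),
    pat = pre ++ suf →
    suf.foldl (fun (i : Nat) itemset =>
        if i < pat.length && pvSubset (pat.getD i []) itemset then i + 1 else i)
      pre.length = pat.length := by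
  intro suf
  induction suf with
  | nil => intro pre h; simp [h]
  | cons a suf ihs =>
    intro pre h
    have hlt : pre.length < pat.length := by
      subst h; simp only [List.length_append, List.length_cons]; omega
    have hget : pat[pre.length]'hlt = a := by
      subst h; rw [List.getElem_append_right (Nat.le_refl _)]; simp
    rw [List.foldl_cons, if_pos (by simp [hlt, hget, pvSubset_self])]
    have h1 : pre.length + 1 = (pre ++ [a]).length := by simp
    rw [h1]
    exact ihs (pre ++ [a]) (by simp [h])

theorem pvIsSub_self (p : List (List String)) : pvIsSub p p = true := by
  unfold pvIsSub
  have h0 : (0 : Nat) = ([] : List (List String)).length := rfl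
  rw [h0, pvIsSub_aux p p [] rfl]
  simp

-- generic shape of A's filter loop
theorem pvFoldl_skip_append {α β : Type} (q : α → Bool) (f : α → β) :
    ∀ (l : List α) (acc : List β),
    l.foldl (fun a x => if q x then a else a ++ [f x]) acc
      = acc ++ (l.filter (fun x => !q x)).map f := by
  intro l
  induction l with
  | nil => intro acc; simp
  | cons x l ihl =>
    intro acc
    by_cases hx : q x <;> simp [hx, ihl]

theorem pvEnum_filter_map {γ : Type} (g : γ → Bool) :
    ∀ (rs : List γ) (s : Int),
    ((PySem.List.enumerate rs s).filter (fun x => g x.2)).map (fun x => x.2)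
      = rs.filter g := by
  intro rs
  induction rs with
  | nil => intro s; simp [PySem.List.enumerate_nil]
  | cons a rs ihr =>
    intro s
    rw [PySem.List.enumerate_cons]
    by_cases ha : g a <;> simp [ha, ihr]

theorem pvBad_congr (rs : List (List (List String) × Int))
    (x : Int × (List (List String) × Int)) (hx : x ∈ PySem.List.enumerate rs 0) :
    ((PySem.List.enumerate rs 0).any (fun y =>
        !(x.1 == y.1) && ((x.2.2 == y.2.2) && (pvIsSub x.2.1 y.2.1 && !pvIsSub y.2.1 x.2.1))))
      = pvBad rs x.2 := by
  rw [PySem.List.mem_enumerate_iff] at hx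
  obtain ⟨k, hk, hxe⟩ := hx
  rw [Bool.eq_iff_iff]
  simp only [pvBad, List.any_eq_true]
  constructor
  · rintro ⟨y, hy, hc⟩
    rw [PySem.List.mem_enumerate_iff] at hy
    obtain ⟨m, hm, hye⟩ := hy
    refine ⟨rs[m], List.getElem_mem hm, ?_⟩
    subst hye
    simp only [Bool.and_eq_true, beq_iff_eq] at hc ⊢
    exact ⟨hc.2.1.symm, hc.2.2⟩
  · rintro ⟨qt, hqt, hc⟩
    obtain ⟨m, hm, hqe⟩ := List.mem_iff_getElem.mp hqt
    by_cases hmk : m = k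
    · exfalso
      simp only [Bool.and_eq_true] at hc
      have hq : qt = x.2 := by subst hmk; rw [hqe] at *; subst hxe; rfl
      rw [hq] at hc
      have := hc.2.2
      rw [pvIsSub_self] at this
      simp at this
    · refine ⟨(0 + (m : Int), rs[m]), ?_, ?_⟩
      · rw [PySem.List.mem_enumerate_iff]; exact ⟨m, hm, rfl⟩
      · simp only [Bool.and_eq_true, beq_iff_eq] at hc ⊢
        refine ⟨?_, ?_, ?_⟩
        · subst hxe; simp; omega
        · subst hqe; exact hc.1.symm
        · subst hqe; exact hc.2

theorem pvBuckets_getD (rs : List (List (List String) × Int)) (s : Int) :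
    (pvBuckets rs).getD s []
      = (rs.filter (fun ps => ps.2 == s)).map (fun ps => ps.1) := by
  unfold pvBuckets
  rw [show rs.foldl (fun d ps => d.modify ps.2 [] (· ++ [ps.1])) PySem.Dict.empty
        = (rs.map (fun ps => (ps.2, ps.1))).foldl
            (fun d p => d.modify p.1 [] (· ++ [p.2])) PySem.Dict.empty
      from by rw [List.foldl_map]]
  rw [PySem.Dict.getD_foldl_modify_append]
  simp [List.filter_map, Function.comp_def]

theorem pvClosed_eq (rs : List (List (List String) × Int)) : pvClosedA rs = pvClosedB rs := by
  have hA : pvClosedA rs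
      = ((PySem.List.enumerate rs 0).filter (fun x =>
          !((PySem.List.enumerate rs 0).any (fun y =>
            !(x.1 == y.1) && ((x.2.2 == y.2.2) &&
              (pvIsSub x.2.1 y.2.1 && !pvIsSub y.2.1 x.2.1)))))).map (fun x => x.2) := by
    unfold pvClosedA
    exact pvFoldl_skip_append _ _ _ _
  rw [hA, List.filter_congr (fun x hx => by rw [pvBad_congr rs x hx])]
  rw [pvEnum_filter_map (fun ps => !pvBad rs ps) rs 0]
  unfold pvClosedB
  refine (List.filter_congr ?_).symm
  intro ps _
  rw [pvBuckets_getD]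
  simp [pvBad, List.any_filter, List.any_map, Function.comp_def]

-- ===== VERDICT (by name: the statement is the Claim_ definition above) =====
theorem run_clospan_spec : Claim_equal_run_clospan := by
  intro sequences minsup _
  unfold Spec_run_clospan run_clospan run_clospan_alt
  have h := pvStack_eq_dfs sequences minsup (pvMaxLen sequences + 2) [] sequences [] [] 0
  simp only [Nat.add_zero] at h
  rw [h]
  simp only [pvRunStack]
  exact pvClosed_eq _
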